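-- pv_equiv track=rewrite | github.com/heenach12/learning | max_difference_increasing_elements.py | max_difference_increasing_elements
-- ===== SOURCE A (Python) =====
-- def max_difference_increasing_elements(arr):
--     arr.append(0)
--     res = -1
--     st = []
--     for i in arr:
--         if st and i <= st[-1]:
--             if len(st) > 1:
--                 res =  max(st[-1]-st[0], res)
--             while st and i <= st[-1]:
--                 st.pop()
--         st.append(i)
--     return res
-- ===== SOURCE B (Python) =====
-- def max_difference_increasing_elements(arr):
--     # Stack-free: the stack's top is always the previous element and its
--     # bottom is the running minimum, so track two scalars instead.
--     arr.append(0)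
--     res = -1
--     min_so_far = arr[0]
--     prev = arr[0]
--     for cur in arr[1:]:
--         if cur <= prev and min_so_far < prev:
--             res = max(res, prev - min_so_far)
--         min_so_far = min(min_so_far, cur)
--         prev = cur
--     return res
-- ===== Notes on version B (the rewrite author's own statement) =====
-- stated objective: simpler
-- what changed: Replaces A's monotonic stack and inner pop-loop with two scalars (running minimum and previous element), since the stack's top is always the previous element and its bottom the running minimum; the mutation arr.append(0) is preserved.
import Mathlib
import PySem

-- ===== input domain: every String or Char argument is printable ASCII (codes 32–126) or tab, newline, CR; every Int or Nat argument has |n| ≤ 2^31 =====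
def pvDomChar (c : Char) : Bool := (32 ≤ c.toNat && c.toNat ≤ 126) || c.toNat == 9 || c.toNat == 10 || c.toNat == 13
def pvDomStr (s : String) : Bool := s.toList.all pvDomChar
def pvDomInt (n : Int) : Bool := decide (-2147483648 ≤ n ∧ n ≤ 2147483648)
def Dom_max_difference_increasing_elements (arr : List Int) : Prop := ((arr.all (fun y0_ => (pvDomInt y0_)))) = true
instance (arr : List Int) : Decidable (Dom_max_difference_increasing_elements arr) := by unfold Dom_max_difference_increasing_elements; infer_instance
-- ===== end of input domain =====

-- B drops A's monotonic stack for two scalars (running min, previous element): simpler, same O(n).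
-- Both A and B mutate their argument (arr.append(0)); the equivalence proved is about the return value.

-- ===== PORT A =====
-- stack `st` is kept head-first: head = st[-1] (top), getLast? = st[0] (bottom);
-- `while st and i <= st[-1]: st.pop()` is exactly dropWhile (i ≤ ·) on the head-first list.
def pvStepA (s : Int × List Int) (i : Int) : Int × List Int :=
  match s with
  | (res, st) =>
    match st with
    | [] => (res, [i])
    | t :: _ =>
      if i ≤ t then
        let res' := if st.length > 1 then max (t - st.getLast?.getD 0) res else res
        (res', i :: st.dropWhile (fun x => decide (i ≤ x)))
      else (res, i :: st)

def max_difference_increasing_elements (arr : List Int) : Int :=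
  ((arr ++ [0]).foldl pvStepA (-1, [])).1

-- ===== PORT B =====
-- state = (res, min_so_far, prev)
def pvStepB (s : Int × Int × Int) (cur : Int) : Int × Int × Int :=
  match s with
  | (res, m, prev) =>
    let res' := if cur ≤ prev ∧ m < prev then max res (prev - m) else res
    (res', min m cur, cur)

def max_difference_increasing_elements_alt (arr : List Int) : Int :=
  match arr ++ [0] with
  | [] => -1  -- unreachable: arr ++ [0] is nonempty
  | a0 :: rest => (rest.foldl pvStepB (-1, a0, a0)).1

-- ===== PRECONDITION & SPEC =====
def Spec_max_difference_increasing_elements (arr : List Int) (out : Int) : Prop := out = max_difference_increasing_elements_alt arr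
instance (arr : List Int) (out : Int) : Decidable (Spec_max_difference_increasing_elements arr out) := by unfold Spec_max_difference_increasing_elements; infer_instance

-- ===== CLAIM (what is proved, stated in full; the proofs are below) =====
def Claim_equal_max_difference_increasing_elements : Prop := ∀ (arr : List Int), Dom_max_difference_increasing_elements arr → Spec_max_difference_increasing_elements arr (max_difference_increasing_elements arr)

-- ===== LEMMAS AND PROOFS =====

-- Invariant tying A's state (res, st) to B's state (res, m, prev):
-- same res, head st = prev, bottom (getLast) st = m, st strictly decreasing head-first.
def pvInv (sa : Int × List Int) (sb : Int × Int × Int) : Prop :=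
  sa.1 = sb.1 ∧ sa.2.head? = some sb.2.2 ∧ sa.2.getLast? = some sb.2.1 ∧
  List.Pairwise (· > ·) sa.2

theorem pv_getLast?_dropWhile (p : Int → Bool) (l : List Int)
    (h : l.dropWhile p ≠ []) : (l.dropWhile p).getLast? = l.getLast? := by
  induction l with
  | nil => simp at h
  | cons a l ih =>
    by_cases hp : p a
    · rw [List.dropWhile_cons_of_pos hp] at h ⊢
      rw [ih h]
      rcases l with _ | ⟨b, l⟩
      · simp [List.dropWhile] at h
      · simp [List.getLast?_cons_cons]
    · rw [List.dropWhile_cons_of_neg hp]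

theorem pv_head?_dropWhile (p : Int → Bool) (l : List Int) (x : Int)
    (h : (l.dropWhile p).head? = some x) : ¬ p x := by
  induction l with
  | nil => simp [List.dropWhile] at h
  | cons a l ih =>
    by_cases hp : p a
    · rw [List.dropWhile_cons_of_pos hp] at h; exact ih h
    · rw [List.dropWhile_cons_of_neg hp] at h; simp at h; subst h; simp [hp]

-- every element of a strictly decreasing list is ≤ its head
theorem pv_le_head (l : List Int) (hch : List.Pairwise (· > ·) l) (t x : Int)
    (hh : l.head? = some t) (hx : x ∈ l) : x ≤ t := by
  rcases l with _ | ⟨a, l⟩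
  · simp at hx
  · simp at hh; subst hh
    rcases List.mem_cons.1 hx with rfl | hx
    · omega
    · have := (List.pairwise_cons.1 hch).1 x hx; omega

theorem pv_step (sa : Int × List Int) (sb : Int × Int × Int) (i : Int)
    (h : pvInv sa sb) : pvInv (pvStepA sa i) (pvStepB sb i) := by
  obtain ⟨ra, st⟩ := sa
  obtain ⟨rb, m, p⟩ := sb
  obtain ⟨hres, hhead, hlast, hchain⟩ := h
  simp only at hres hhead hlast hchain
  subst hres
  rcases st with _ | ⟨t, rest⟩
  · simp at hhead
  · simp only [List.head?_cons, Option.some.injEq] at hhead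
    subst hhead
    -- m = bottom, m ≤ t (head)
    have hml : m ≤ t := pv_le_head _ hchain _ _ rfl (List.mem_of_getLast? hlast)
    by_cases hip : i ≤ t
    · -- descent: A records (maybe) and pops
      have hresq : (if (t :: rest).length > 1 then max (t - (t :: rest).getLast?.getD 0) ra else ra)
          = (if i ≤ t ∧ m < t then max ra (t - m) else ra) := by
        rcases rest with _ | ⟨b, rest⟩
        · simp at hlast
          simp [hlast]
        · have hlast2 : (b :: rest).getLast? = some m := by
            rw [← List.getLast?_cons_cons (a := t)]; exact hlast
          have hmr : m ∈ b :: rest := List.mem_of_getLast? hlast2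
          have hmt : m < t := by
            have := (List.pairwise_cons.1 hchain).1 m hmr; omega
          simp [hlast2, hip, hmt, max_comm]
      have hA : pvStepA (ra, t :: rest) i
          = ((if (t :: rest).length > 1 then max (t - (t :: rest).getLast?.getD 0) ra else ra),
             i :: (t :: rest).dropWhile (fun x => decide (i ≤ x))) := by
        simp [pvStepA, hip]
      have hB : pvStepB (ra, m, t) i
          = ((if i ≤ t ∧ m < t then max ra (t - m) else ra), min m i, i) := rfl
      rw [hA, hB]
      set d := (t :: rest).dropWhile (fun x => decide (i ≤ x)) with hd
      refine ⟨hresq, rfl, ?_, ?_⟩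
      · -- getLast? of new stack = min m i
        rcases hdn : d with _ | ⟨h1, d1⟩
        · -- everything popped: i ≤ all, so i ≤ m
          have hall := List.dropWhile_eq_nil_iff.1 (hd ▸ hdn)
          have him : i ≤ m := by
            have := hall m (List.mem_of_getLast? hlast)
            simpa using this
          simp [min_eq_right him]
        · have hdnn : d ≠ [] := by simp [hdn]
          have hlast' : d.getLast? = some m := by
            rw [hd, pv_getLast?_dropWhile _ _ (hd ▸ hdnn)]; exact hlast
          have hh1 : h1 < i := by
            have := pv_head?_dropWhile _ (t :: rest) h1 (by rw [← hd, hdn]; rfl)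
            simpa using this
          have hdch : List.Pairwise (· > ·) d :=
            List.Pairwise.sublist (hd ▸ List.dropWhile_sublist _) hchain
          have hmd : m ≤ h1 :=
            pv_le_head d hdch h1 m (by rw [hdn]; rfl) (List.mem_of_getLast? hlast')
          have hmin : min m i = m := min_eq_left (by omega)
          simp only [hmin, ← hlast', hdn, List.getLast?_cons_cons]
      · -- chain of i :: d
        have hdch : List.Pairwise (· > ·) d :=
          List.Pairwise.sublist (hd ▸ List.dropWhile_sublist _) hchain
        refine List.pairwise_cons.2 ⟨?_, hdch⟩
        intro x hx
        rcases hdn : d with _ | ⟨h1, d1⟩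
        · rw [hdn] at hx; simp at hx
        · have hh1 : h1 < i := by
            have := pv_head?_dropWhile _ (t :: rest) h1 (by rw [← hd, hdn]; rfl)
            simpa using this
          have := pv_le_head d hdch h1 x (by rw [hdn]; rfl) (hdn ▸ hx)
          omega
    · -- ascent: just push
      have hip2 : ¬ (i ≤ t ∧ m < t) := fun h => hip h.1
      have hA : pvStepA (ra, t :: rest) i = (ra, i :: t :: rest) := by
        simp [pvStepA, hip]
      have hB : pvStepB (ra, m, t) i = (ra, min m i, i) := by
        simp [pvStepB, hip2]
      rw [hA, hB]
      refine ⟨rfl, rfl, ?_, ?_⟩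
      · have hmin : min m i = m := min_eq_left (by omega)
        simp only [hmin, List.getLast?_cons_cons]
        exact hlast
      · refine List.pairwise_cons.2 ⟨?_, hchain⟩
        intro x hx
        have := pv_le_head _ hchain t x rfl hx
        omega

theorem pv_fold (l : List Int) (sa : Int × List Int) (sb : Int × Int × Int)
    (h : pvInv sa sb) : (l.foldl pvStepA sa).1 = (l.foldl pvStepB sb).1 := by
  induction l generalizing sa sb with
  | nil => exact h.1
  | cons a l ih => exact ih _ _ (pv_step sa sb a h)

-- ===== VERDICT (by name: the statement is the Claim_ definition above) =====
theorem max_difference_increasing_elements_spec : Claim_equal_max_difference_increasing_elements := by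
  intro arr _
  unfold Spec_max_difference_increasing_elements
  unfold max_difference_increasing_elements max_difference_increasing_elements_alt
  rcases harr : arr ++ [0] with _ | ⟨a0, rest⟩
  · simp at harr
  · rw [List.foldl_cons]
    have hstep : pvStepA (-1, []) a0 = (-1, [a0]) := rfl
    rw [hstep]
    exact pv_fold rest _ _ ⟨rfl, rfl, rfl, by simp⟩
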